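-- pv_equiv track=rewrite | github.com/GRUpoN8/Dalmax | dama.py | avaliar
-- ===== SOURCE A (Python) =====
-- def avaliar(tab):
--
--     score=0
--
--     for linha in tab:
--
--         for p in linha:
--
--             if p==2: score+=1
--
--             elif p==1: score-=1
--
--             elif p==4: score+=2
--
--             elif p==3: score-=2
--
--     return score
-- ===== SOURCE B (Python) =====
-- def avaliar(tab):
--     cells = [p for linha in tab for p in linha]
--     return cells.count(2) - cells.count(1) + 2 * cells.count(4) - 2 * cells.count(3)
-- ===== Notes on version B (the rewrite author's own statement) =====
-- stated objective: simpler
-- what changed: Replaces the per-cell if/elif accumulator with a flatten-then-count formulation: the weighted score is computed as one closed arithmetic expression over the four piece-code counts.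
import Mathlib
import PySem

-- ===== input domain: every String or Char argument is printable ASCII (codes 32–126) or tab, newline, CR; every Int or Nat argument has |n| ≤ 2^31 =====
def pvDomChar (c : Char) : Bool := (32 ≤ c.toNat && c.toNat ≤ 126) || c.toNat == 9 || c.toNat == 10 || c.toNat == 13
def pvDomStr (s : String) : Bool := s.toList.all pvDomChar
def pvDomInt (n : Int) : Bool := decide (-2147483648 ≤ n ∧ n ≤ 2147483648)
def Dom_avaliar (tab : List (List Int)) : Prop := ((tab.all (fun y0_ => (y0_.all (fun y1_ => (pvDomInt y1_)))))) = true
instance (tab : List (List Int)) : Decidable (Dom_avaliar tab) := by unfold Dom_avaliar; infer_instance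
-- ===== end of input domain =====

-- ===== PORT A =====
-- B: flatten-then-count — the score as a closed expression over the four piece-code counts (simpler decomposition, same cost).
def avaliar (tab : List (List Int)) : Int :=
  tab.foldl (fun score linha =>
    linha.foldl (fun s p =>
      if p == 2 then s + 1
      else if p == 1 then s - 1
      else if p == 4 then s + 2
      else if p == 3 then s - 2
      else s) score) 0

-- ===== PORT B =====
def avaliar_alt (tab : List (List Int)) : Int :=
  let cells := tab.flatMap (fun linha => linha)
  (PySem.List.count cells 2 : Int) - (PySem.List.count cells 1 : Int)
    + 2 * (PySem.List.count cells 4 : Int) - 2 * (PySem.List.count cells 3 : Int)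

-- ===== PRECONDITION & SPEC =====
def Spec_avaliar (tab : List (List Int)) (out : Int) : Prop := out = avaliar_alt tab
instance (tab : List (List Int)) (out : Int) : Decidable (Spec_avaliar tab out) := by unfold Spec_avaliar; infer_instance

-- ===== CLAIM (what is proved, stated in full; the proofs are below) =====
def Claim_equal_avaliar : Prop := ∀ (tab : List (List Int)), Dom_avaliar tab → Spec_avaliar tab (avaliar tab)

-- ===== LEMMAS AND PROOFS =====
theorem row_foldl (l : List Int) (s : Int) :
    l.foldl (fun s p =>
      if p == 2 then s + 1
      else if p == 1 then s - 1
      else if p == 4 then s + 2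
      else if p == 3 then s - 2
      else s) s
    = s + (l.count 2 : Int) - (l.count 1 : Int) + 2 * (l.count 4 : Int) - 2 * (l.count 3 : Int) := by
  induction l generalizing s with
  | nil => simp
  | cons p t ih =>
    simp only [List.foldl_cons, ih, List.count_cons]
    by_cases h2 : p = 2 <;> by_cases h1 : p = 1 <;> by_cases h4 : p = 4 <;> by_cases h3 : p = 3 <;>
      simp_all <;> ring

theorem tab_foldl (tab : List (List Int)) (s : Int) :
    tab.foldl (fun score linha =>
      linha.foldl (fun s p =>
        if p == 2 then s + 1
        else if p == 1 then s - 1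
        else if p == 4 then s + 2
        else if p == 3 then s - 2
        else s) score) s
    = s + ((tab.flatMap (fun l => l)).count 2 : Int) - ((tab.flatMap (fun l => l)).count 1 : Int)
        + 2 * ((tab.flatMap (fun l => l)).count 4 : Int) - 2 * ((tab.flatMap (fun l => l)).count 3 : Int) := by
  induction tab generalizing s with
  | nil => simp
  | cons r t ih =>
    rw [List.foldl_cons, row_foldl, ih]
    simp only [List.flatMap_cons, List.count_append]
    push_cast; ring

-- ===== VERDICT (by name: the statement is the Claim_ definition above) =====
theorem avaliar_spec : Claim_equal_avaliar := by
  intro tab _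
  unfold Spec_avaliar avaliar avaliar_alt
  rw [tab_foldl]
  simp [PySem.List.count_eq]
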